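-- pv_equiv track=rewrite | github.com/aleiepure/devtoolbox | src/services/text_inspector.py | _to_sentence_case
-- ===== SOURCE A (Python) =====
-- def _to_sentence_case(text:str) -> str:
--
--     output = ""
--     newSentence = True
--
--     for i in range(0, len(text)):
--
--         if text[i] == '.' or text[i] == '?' or text[i] == '!' or text[i] == '\n':
--             output += text[i]
--             newSentence = True
--             continue
--
--         if text[i].isalnum():
--             if newSentence:
--                 output += text[i].upper()
--                 newSentence = False
--             else:
--                 output += text[i].lower()
--         else:
--             output += text[i]
--
--     return output
-- ===== SOURCE B (Python) =====
-- def _capitalize_segment(seg: str) -> str: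
--     out = []
--     first = True
--     for ch in seg:
--         if ch.isalnum():
--             out.append(ch.upper() if first else ch.lower())
--             first = False
--         else:
--             out.append(ch)
--     return ''.join(out)
--
--
-- def _to_sentence_case(text: str) -> str:
--     # Split into sentence segments at the terminators (terminators kept), capitalize
--     # each segment independently, and join everything back together.
--     pieces = []
--     i, n = 0, len(text)
--     while i < n:
--         j = i
--         while j < n and text[j] not in '.?!\n':
--             j += 1
--         pieces.append(_capitalize_segment(text[i:j]))
--         if j < n:
--             pieces.append(text[j])
--         i = j + 1
--     return ''.join(pieces)
-- ===== Notes on version B (the rewrite author's own statement) =====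
-- stated objective: alternative
-- what changed: Replaces A's single state-machine pass (a newSentence flag threaded across the whole string) by a segment decomposition: the text is split at the sentence terminators (period, question mark, exclamation mark, newline), terminators preserved, each segment is capitalized independently by a helper, and the pieces are joined.
import Mathlib
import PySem

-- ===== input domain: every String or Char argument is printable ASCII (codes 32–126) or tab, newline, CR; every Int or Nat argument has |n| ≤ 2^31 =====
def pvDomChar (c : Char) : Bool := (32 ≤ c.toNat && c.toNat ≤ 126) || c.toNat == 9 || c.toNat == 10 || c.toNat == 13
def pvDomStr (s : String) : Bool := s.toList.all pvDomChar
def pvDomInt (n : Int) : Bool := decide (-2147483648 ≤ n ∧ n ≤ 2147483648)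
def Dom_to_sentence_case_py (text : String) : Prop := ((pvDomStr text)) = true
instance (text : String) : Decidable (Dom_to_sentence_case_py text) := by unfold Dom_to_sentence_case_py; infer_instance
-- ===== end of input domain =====

-- B rewrites A's single newSentence state machine as a split at sentence terminators into segments
-- (terminators kept) with each segment capitalized independently; alternative decomposition.

-- ===== PORT A =====
-- A: one pass, accumulating output and a newSentence flag.
def to_sentence_case_py (text : String) : String :=
  String.ofList
    (text.toList.foldl
      (fun (st : List Char × Bool) c =>
        if c = '.' || c = '?' || c = '!' || c = '\n' then
          (st.1 ++ [c], true)
        else if PySem.Chars.isalnum c then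
          if st.2 then (st.1 ++ [PySem.Chars.upperChar c], false)
          else (st.1 ++ [PySem.Chars.lowerChar c], st.2)
        else (st.1 ++ [c], st.2))
      ([], true)).1

-- ===== PORT B =====
def pvIsTerm (c : Char) : Bool := c = '.' || c = '?' || c = '!' || c = '\n'

-- B's helper _capitalize_segment: uppercase the first alnum, lowercase later alnums.
def pvCapSeg : Bool → List Char → List Char
  | _, [] => []
  | first, c :: cs =>
    if PySem.Chars.isalnum c then
      (if first then PySem.Chars.upperChar c else PySem.Chars.lowerChar c) :: pvCapSeg false cs
    else c :: pvCapSeg first cs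

-- B's outer loop: take the segment up to the next terminator, capitalize it,
-- keep the terminator, continue after it.
def pvSegs (cs : List Char) : List Char :=
  let seg := cs.takeWhile (fun c => !pvIsTerm c)
  match h : cs.dropWhile (fun c => !pvIsTerm c) with
  | [] => pvCapSeg true seg
  | t :: rs => pvCapSeg true seg ++ t :: pvSegs rs
termination_by cs.length
decreasing_by
  have hle := List.length_dropWhile_le (p := fun c => !pvIsTerm c) (l := cs)
  rw [h] at hle
  simpa using Nat.lt_of_lt_of_le (Nat.lt_succ_self _) hle

def to_sentence_case_py_alt (text : String) : String :=
  String.ofList (pvSegs text.toList)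

-- ===== PRECONDITION & SPEC =====
def Spec_to_sentence_case_py (text : String) (out : String) : Prop := out = to_sentence_case_py_alt text
instance (text : String) (out : String) : Decidable (Spec_to_sentence_case_py text out) := by unfold Spec_to_sentence_case_py; infer_instance

-- ===== CLAIM (what is proved, stated in full; the proofs are below) =====
def Claim_equal_to_sentence_case_py : Prop := ∀ (text : String), Dom_to_sentence_case_py text → Spec_to_sentence_case_py text (to_sentence_case_py text)

-- ===== LEMMAS AND PROOFS =====

-- A's loop as a structural recursion producing the tail of the output.
def pvAGo : List Char → Bool → List Char
  | [], _ => []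
  | c :: cs, ns =>
    if pvIsTerm c then c :: pvAGo cs true
    else if PySem.Chars.isalnum c then
      (if ns then PySem.Chars.upperChar c else PySem.Chars.lowerChar c) :: pvAGo cs false
    else c :: pvAGo cs ns

lemma pvFoldl_eq (cs : List Char) : ∀ (acc : List Char) (ns : Bool),
    (cs.foldl
      (fun (st : List Char × Bool) c =>
        if c = '.' || c = '?' || c = '!' || c = '\n' then
          (st.1 ++ [c], true)
        else if PySem.Chars.isalnum c then
          if st.2 then (st.1 ++ [PySem.Chars.upperChar c], false)
          else (st.1 ++ [PySem.Chars.lowerChar c], st.2)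
        else (st.1 ++ [c], st.2))
      (acc, ns)).1 = acc ++ pvAGo cs ns := by
  induction cs with
  | nil => intro acc ns; simp [pvAGo]
  | cons c cs ih =>
    intro acc ns
    rw [List.foldl_cons]
    by_cases ht : pvIsTerm c
    · have ht' : (decide (c = '.') || decide (c = '?') || decide (c = '!') || decide (c = '\n')) = true := by
        simpa [pvIsTerm] using ht
      rw [if_pos ht', ih]
      simp [pvAGo, ht]
    · have ht' : ¬ ((decide (c = '.') || decide (c = '?') || decide (c = '!') || decide (c = '\n')) = true) := by
        simpa [pvIsTerm] using ht
      rw [if_neg ht']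
      by_cases ha : PySem.Chars.isalnum c = true
      · rw [if_pos ha]
        cases ns
        · rw [if_neg (by simp), ih]
          simp [pvAGo, ht, ha]
        · rw [if_pos rfl, ih]
          simp [pvAGo, ht, ha]
      · rw [if_neg ha, ih]
        simp [pvAGo, ht, ha]

lemma pvAGo_split (cs : List Char) : ∀ ns, pvAGo cs ns =
    pvCapSeg ns (cs.takeWhile (fun c => !pvIsTerm c)) ++
      (match cs.dropWhile (fun c => !pvIsTerm c) with
       | [] => []
       | t :: rs => t :: pvAGo rs true) := by
  induction cs with
  | nil => intro ns; simp [pvAGo, pvCapSeg]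
  | cons c cs ih =>
    intro ns
    by_cases ht : pvIsTerm c
    · simp [pvAGo, ht, pvCapSeg]
    · by_cases ha : PySem.Chars.isalnum c
      · simp [pvAGo, ht, ha, pvCapSeg, ih]
      · simp [pvAGo, ht, ha, pvCapSeg, ih]

lemma pvSegs_eq (cs : List Char) : pvSegs cs = pvAGo cs true := by
  rw [pvSegs, pvAGo_split]
  cases h : cs.dropWhile (fun c => !pvIsTerm c) with
  | nil => simp
  | cons t rs => simp [pvSegs_eq rs]
termination_by cs.length
decreasing_by
  have hle := List.length_dropWhile_le (p := fun c => !pvIsTerm c) (l := cs)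
  rw [h] at hle
  simpa using Nat.lt_of_lt_of_le (Nat.lt_succ_self _) hle

-- ===== VERDICT (by name: the statement is the Claim_ definition above) =====
theorem to_sentence_case_py_spec : Claim_equal_to_sentence_case_py := by
  intro text _
  unfold Spec_to_sentence_case_py to_sentence_case_py to_sentence_case_py_alt
  rw [pvFoldl_eq, pvSegs_eq, List.nil_append]
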